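-- pv_equiv track=rewrite | github.com/MarioBrum/SocialMediaDATABASE | main.py | maiorInteracao
-- ===== SOURCE A (Python) =====
-- def maiorInteracao(dicionarioUsuarios):
--     listaUsuarios = list(dicionarioUsuarios.keys())
--     listaValores = list(dicionarioUsuarios.values())
--     maiorValor = listaValores[0]
--     maiorUsuario = listaUsuarios[0]
--     for i in range(0,len(listaValores)):
--         if(listaValores[i] > maiorValor):
--             maiorValor = listaValores[i]
--             maiorUsuario = listaUsuarios[i]
--     return (maiorUsuario,maiorValor)
-- ===== SOURCE B (Python) =====
-- def maiorInteracao(dicionarioUsuarios):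
--     ordenado = sorted(dicionarioUsuarios.items(), key=lambda item: item[1], reverse=True)
--     return ordenado[0]
-- ===== Notes on version B (the rewrite author's own statement) =====
-- stated objective: alternative
-- what changed: Replaces the manual index loop over parallel keys()/values() lists with one stable descending sort of the items followed by taking the first element; stability preserves A's first-wins tie rule.
import Mathlib
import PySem

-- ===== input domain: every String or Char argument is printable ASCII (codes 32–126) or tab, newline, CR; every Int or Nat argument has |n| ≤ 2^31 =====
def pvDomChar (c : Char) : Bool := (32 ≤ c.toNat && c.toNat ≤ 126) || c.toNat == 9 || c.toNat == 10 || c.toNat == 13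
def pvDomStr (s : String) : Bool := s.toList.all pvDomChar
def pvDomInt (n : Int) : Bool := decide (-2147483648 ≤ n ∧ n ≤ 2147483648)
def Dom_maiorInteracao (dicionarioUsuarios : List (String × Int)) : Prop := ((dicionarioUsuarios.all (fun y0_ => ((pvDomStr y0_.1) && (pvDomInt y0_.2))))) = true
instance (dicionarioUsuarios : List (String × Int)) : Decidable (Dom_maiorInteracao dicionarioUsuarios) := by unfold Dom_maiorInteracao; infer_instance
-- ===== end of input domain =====

-- B replaces A's manual index loop with a stable descending sort of the items plus taking
-- the first element (objective: alternative; stability preserves A's first-wins tie rule).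

-- ===== PORT A =====
-- listaValores[0] raises IndexError on an empty dict; pyGetD's default here is only
-- reached outside Pre_ (nonempty input).
def maiorInteracao (dicionarioUsuarios : List (String × Int)) : String × Int :=
  let listaUsuarios := dicionarioUsuarios.map Prod.fst
  let listaValores := dicionarioUsuarios.map Prod.snd
  let maiorValor := PySem.List.pyGetD listaValores 0 0
  let maiorUsuario := PySem.List.pyGetD listaUsuarios 0 ""
  List.foldl
    (fun (acc : String × Int) i =>
      if PySem.List.pyGetD listaValores i 0 > acc.2 then
        (PySem.List.pyGetD listaUsuarios i "", PySem.List.pyGetD listaValores i 0)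
      else acc)
    (maiorUsuario, maiorValor)
    (PySem.List.pyRange 0 (listaValores.length : Int) 1)

-- ===== PORT B =====
-- ordenado[0] raises IndexError on an empty dict; the none branch is only reached outside Pre_.
def maiorInteracao_alt (dicionarioUsuarios : List (String × Int)) : String × Int :=
  let ordenado := PySem.List.sorted dicionarioUsuarios (fun item => item.2) true
  match PySem.List.pyGet? ordenado 0 with
  | some m => m
  | none => ("", 0)

-- ===== PRECONDITION & SPEC =====
-- A raises IndexError on the empty dict (listaValores[0]); B raises IndexError there too.
def Pre_maiorInteracao (dicionarioUsuarios : List (String × Int)) : Prop :=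
  dicionarioUsuarios ≠ []
instance (dicionarioUsuarios : List (String × Int)) : Decidable (Pre_maiorInteracao dicionarioUsuarios) := by unfold Pre_maiorInteracao; infer_instance
def pvWitness_maiorInteracao : (List (String × Int)) := [("ana", 3), ("bob", 3), ("eva", 1)]
def Spec_maiorInteracao (dicionarioUsuarios : List (String × Int)) (out : String × Int) : Prop := out = maiorInteracao_alt dicionarioUsuarios
instance (dicionarioUsuarios : List (String × Int)) (out : String × Int) : Decidable (Spec_maiorInteracao dicionarioUsuarios out) := by unfold Spec_maiorInteracao; infer_instance

-- ===== CLAIM (what is proved, stated in full; the proofs are below) =====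
def Claim_equal_maiorInteracao : Prop := ∀ (dicionarioUsuarios : List (String × Int)), Dom_maiorInteracao dicionarioUsuarios → Pre_maiorInteracao dicionarioUsuarios → Spec_maiorInteracao dicionarioUsuarios (maiorInteracao dicionarioUsuarios)

-- ===== LEMMAS AND PROOFS =====

-- the strict-greater first-wins running maximum both sides reduce to
def pvStep (acc kv : String × Int) : String × Int := if acc.2 < kv.2 then kv else acc

-- head (as pyGet? · 0) of the insertion fold behind sorted(…, reverse=True) is the
-- first-wins running maximum of the elements inserted so far
lemma pv_get0_foldl (t : List (String × Int)) :
    ∀ (m : String × Int) (ys : List (String × Int)),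
      PySem.List.pyGet?
        (List.foldl (fun acc x =>
            PySem.List.insertBy (fun a b => decide (b.2 < a.2)) x acc) (m :: ys) t) 0
        = some (List.foldl pvStep m t) := by
  induction t with
  | nil =>
      intro m ys
      simp
  | cons y t ih =>
      intro m ys
      simp only [List.foldl_cons]
      by_cases h : m.2 < y.2
      · rw [show PySem.List.insertBy (fun a b => decide (b.2 < a.2)) y (m :: ys)
              = y :: m :: ys from by simp [PySem.List.insertBy, h]]
        rw [ih]
        simp [pvStep, h]
      · rw [show PySem.List.insertBy (fun a b => decide (b.2 < a.2)) y (m :: ys)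
              = m :: PySem.List.insertBy (fun a b => decide (b.2 < a.2)) y ys from by
            simp [PySem.List.insertBy, h]]
        rw [ih]
        simp [pvStep, h]

-- A's index loop over the two parallel lists is the same running maximum over the pairs
lemma pv_A_foldl (d : List (String × Int)) (init : String × Int) :
    List.foldl
      (fun (acc : String × Int) i =>
        if PySem.List.pyGetD (d.map Prod.snd) i 0 > acc.2 then
          (PySem.List.pyGetD (d.map Prod.fst) i "", PySem.List.pyGetD (d.map Prod.snd) i 0)
        else acc)
      init (PySem.List.pyRange 0 ((d.map Prod.snd).length : Int) 1)
    = List.foldl pvStep init d := by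
  have hlen : ((d.map Prod.snd).length : Int) = (d.length : Int) := by simp
  rw [hlen]
  have hcongr :
      List.foldl
        (fun (acc : String × Int) i =>
          if PySem.List.pyGetD (d.map Prod.snd) i 0 > acc.2 then
            (PySem.List.pyGetD (d.map Prod.fst) i "", PySem.List.pyGetD (d.map Prod.snd) i 0)
          else acc)
        init (PySem.List.pyRange 0 (d.length : Int) 1)
      = List.foldl (fun (acc : String × Int) i => pvStep acc (PySem.List.pyGetD d i ("", 0)))
          init (PySem.List.pyRange 0 (d.length : Int) 1) := by
    apply PySem.List.foldl_congr_mem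
    intro acc j hj
    have hj' := (PySem.List.mem_pyRange_one).1 hj
    have h0 : (0 : Int) ≤ j := hj'.1
    have hlt : j < (d.length : Int) := hj'.2
    have hltn : j.toNat < d.length := by omega
    have hlt1 : j < ((d.map Prod.fst).length : Int) := by simp; omega
    have hlt2 : j < ((d.map Prod.snd).length : Int) := by simp; omega
    rw [PySem.List.pyGetD_eq_getElem (d.map Prod.snd) 0 h0 hlt2,
        PySem.List.pyGetD_eq_getElem (d.map Prod.fst) "" h0 hlt1,
        PySem.List.pyGetD_eq_getElem d ("", 0) h0 hlt]
    simp [pvStep, gt_iff_lt]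
  rw [hcongr]
  exact PySem.List.foldl_pyRange_zero_pyGetD' d ("", 0)
    (fun acc kv => pvStep acc kv) init

-- ===== VERDICT (by name: the statement is the Claim_ definition above) =====
theorem maiorInteracao_spec : Claim_equal_maiorInteracao := by
  intro d _hdom hpre
  unfold Spec_maiorInteracao
  cases d with
  | nil => exact absurd rfl hpre
  | cons x t =>
      unfold maiorInteracao maiorInteracao_alt
      simp only []
      rw [PySem.List.sorted_rev_eq_foldl_insertBy]
      simp only [List.foldl_cons]
      rw [show PySem.List.insertBy (fun a b => decide ((fun item => item.2) b < (fun item => item.2) a)) x []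
            = [x] from by simp [PySem.List.insertBy]]
      rw [pv_get0_foldl t x []]
      rw [pv_A_foldl (x :: t) _]
      have hinit : (PySem.List.pyGetD ((x :: t).map Prod.fst) 0 "",
                    PySem.List.pyGetD ((x :: t).map Prod.snd) 0 0) = x := by
        simp [PySem.List.pyGetD_zero_cons]
      rw [hinit]
      simp [List.foldl_cons, pvStep]
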